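-- pv_equiv track=rewrite | github.com/michaelwoodroof/Anagram-Finder | anagramfinder.py | deconstructWord
-- ===== SOURCE A (Python) =====
-- def deconstructWord(word = ""):
--     if len(word) >= 1 and type(word) == str:
--         deconstructed = [0] * 27
--         for char in word:
--             asciiValue = ord(char.upper()) - 65
--             if asciiValue >= 0 and asciiValue <= 25:
--                 deconstructed[asciiValue] += 1
--             elif char == "\'":
--                 deconstructed[26] += 1
--             else:
--                 return None
--         return deconstructed
--     return None
-- ===== SOURCE B (Python) =====
-- def deconstructWord(word = ""):
--     if not (len(word) >= 1 and type(word) == str):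
--         return None
--     def key(ch):
--         v = ord(ch.upper()) - 65
--         if 0 <= v <= 25:
--             return v
--         if ch == "'":
--             return 26
--         return None
--     keys = [key(ch) for ch in word]
--     if None in keys:
--         return None
--     return [keys.count(i) for i in range(27)]
-- ===== Notes on version B (the rewrite author's own statement) =====
-- stated objective: alternative
-- what changed: Replaces A's single-pass mutable accumulator with early return by a map-then-count decomposition: classify every character into a bucket index, reject if any classification fails, then build the vector as per-bucket counts of the key list.
import Mathlib
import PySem

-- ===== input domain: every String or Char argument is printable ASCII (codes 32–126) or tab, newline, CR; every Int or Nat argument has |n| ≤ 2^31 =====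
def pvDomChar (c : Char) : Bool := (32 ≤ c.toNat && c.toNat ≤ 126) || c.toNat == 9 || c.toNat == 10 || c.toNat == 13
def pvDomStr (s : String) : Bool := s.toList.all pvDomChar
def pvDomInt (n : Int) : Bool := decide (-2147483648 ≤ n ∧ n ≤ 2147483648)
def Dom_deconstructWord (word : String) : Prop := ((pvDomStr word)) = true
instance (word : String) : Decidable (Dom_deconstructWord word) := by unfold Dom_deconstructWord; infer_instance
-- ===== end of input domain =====

-- ===== PORT A =====
-- B replaces A's single mutable-accumulator pass (with early return) by a map-then-count decomposition; same return value.

-- A's loop: walk the characters mutating the 27-slot accumulator, early return None on a bad char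
def pvALoop : List Char → List Int → Option (List Int)
  | [], acc => some acc
  | c :: cs, acc =>
    if 0 ≤ (c.toUpper.toNat : Int) - 65 ∧ (c.toUpper.toNat : Int) - 65 ≤ 25 then
      pvALoop cs (acc.set ((c.toUpper.toNat : Int) - 65).toNat
        (acc.getD ((c.toUpper.toNat : Int) - 65).toNat 0 + 1))
    else if c = '\'' then
      pvALoop cs (acc.set 26 (acc.getD 26 0 + 1))
    else none

def deconstructWord (word : String) : Option (List Int) :=
  if word.toList.length ≥ 1 then pvALoop word.toList (List.replicate 27 0) else none

-- ===== PORT B =====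
-- B's key helper: bucket index of a character, none if invalid
def pvKey (ch : Char) : Option Int :=
  if 0 ≤ (ch.toUpper.toNat : Int) - 65 ∧ (ch.toUpper.toNat : Int) - 65 ≤ 25 then
    some ((ch.toUpper.toNat : Int) - 65)
  else if ch = '\'' then some 26
  else none

def deconstructWord_alt (word : String) : Option (List Int) :=
  if word.toList.length ≥ 1 then
    if (word.toList.map pvKey).contains none then none
    else some ((List.range 27).map
      (fun (i : Nat) => ((word.toList.map pvKey).count (some (i : Int)) : Int)))
  else none

-- ===== PRECONDITION & SPEC =====
def Spec_deconstructWord (word : String) (out : Option (List Int)) : Prop := out = deconstructWord_alt word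
instance (word : String) (out : Option (List Int)) : Decidable (Spec_deconstructWord word out) := by unfold Spec_deconstructWord; infer_instance

-- ===== CLAIM (what is proved, stated in full; the proofs are below) =====
def Claim_equal_deconstructWord : Prop := ∀ (word : String), Dom_deconstructWord word → Spec_deconstructWord word (deconstructWord word)

-- ===== LEMMAS AND PROOFS =====

-- a length-27 list is the range-27 map of its own getD
theorem pvList_eq_map_range (acc : List Int) (hlen : acc.length = 27) :
    (List.range 27).map (fun i => acc.getD i 0) = acc := by
  apply List.ext_getElem
  · simp [hlen]
  · intro i h1 h2
    simp only [List.getElem_map, List.getElem_range]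
    exact List.getD_eq_getElem acc 0 h2

-- incrementing slot k of a length-27 accumulator, read at slot i < 27
theorem pvBump (acc : List Int) (k i : Nat) (hi : i < 27) (hlen : acc.length = 27) :
    (acc.set k (acc.getD k 0 + 1)).getD i 0 = acc.getD i 0 + (if k = i then 1 else 0) := by
  have hset : i < (acc.set k (acc.getD k 0 + 1)).length := by
    rw [List.length_set, hlen]
    exact hi
  have hacc : i < acc.length := by omega
  rw [List.getD_eq_getElem _ 0 hset, List.getD_eq_getElem _ 0 hacc, List.getElem_set]
  split_ifs with h
  · subst h
    rw [List.getD_eq_getElem _ 0 hacc]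
  · ring

-- A's loop characterised: on a length-27 accumulator it returns none iff some char is invalid,
-- and otherwise each slot is the old slot plus the count of chars keyed to it.
theorem pvALoop_char (cs : List Char) (acc : List Int) (hlen : acc.length = 27) :
    pvALoop cs acc =
      if (cs.map pvKey).contains none then none
      else some ((List.range 27).map
        (fun i => acc.getD i 0 + ((cs.map pvKey).count (some (i : Int)) : Int))) := by
  induction cs generalizing acc with
  | nil =>
    simp only [pvALoop, List.map_nil, List.contains_nil, Bool.false_eq_true, if_false,
      List.count_nil, Nat.cast_zero, add_zero]
    exact congrArg some (pvList_eq_map_range acc hlen).symm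
  | cons c cs ih =>
    simp only [pvALoop]
    by_cases h1 : 0 ≤ (c.toUpper.toNat : Int) - 65 ∧ (c.toUpper.toNat : Int) - 65 ≤ 25
    · have hkey : pvKey c = some ((c.toUpper.toNat : Int) - 65) := by
        unfold pvKey
        rw [if_pos h1]
      rw [if_pos h1, ih _ (by simp [hlen])]
      simp only [List.map_cons, List.contains_cons, hkey]
      have hb : ((none : Option Int) == some ((c.toUpper.toNat : Int) - 65)) = false := by simp
      rw [hb, Bool.false_or]
      split_ifs with h2
      · rfl
      · refine congrArg some (List.map_congr_left ?_)
        intro i hi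
        have hi' : i < 27 := List.mem_range.mp hi
        rw [pvBump acc _ i hi' hlen, List.count_cons]
        by_cases hv : ((c.toUpper.toNat : Int) - 65) = (i : Int)
        · have hk : ((c.toUpper.toNat : Int) - 65).toNat = i := by omega
          have hbe : ((some ((c.toUpper.toNat : Int) - 65) : Option Int) == some (i : Int)) = true := by
            simp [hv]
          rw [if_pos hk, hbe, if_pos rfl]
          push_cast
          ring
        · have hk : ¬(((c.toUpper.toNat : Int) - 65).toNat = i) := by omega
          have hbe : ((some ((c.toUpper.toNat : Int) - 65) : Option Int) == some (i : Int)) = false := by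
            simp [hv]
          rw [if_neg hk, hbe]
          simp only [Bool.false_eq_true, if_false]
          push_cast
          ring
    · by_cases h2 : c = '\''
      · have hkey : pvKey c = some 26 := by
          unfold pvKey
          rw [if_neg h1, if_pos h2]
        rw [if_neg h1, if_pos h2, ih _ (by simp [hlen])]
        simp only [List.map_cons, List.contains_cons, hkey]
        have hb : ((none : Option Int) == some 26) = false := by simp
        rw [hb, Bool.false_or]
        split_ifs with h3
        · rfl
        · refine congrArg some (List.map_congr_left ?_)
          intro i hi
          have hi' : i < 27 := List.mem_range.mp hi
          rw [pvBump acc 26 i hi' hlen, List.count_cons]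
          by_cases hv : ((26 : Int)) = (i : Int)
          · have hk : (26 : Nat) = i := by omega
            have hbe : ((some (26 : Int) : Option Int) == some (i : Int)) = true := by
              simp [hv]
            rw [if_pos hk, hbe, if_pos rfl]
            push_cast
            ring
          · have hk : ¬((26 : Nat) = i) := by omega
            have hbe : ((some (26 : Int) : Option Int) == some (i : Int)) = false := by
              simp [hv]
            rw [if_neg hk, hbe]
            simp only [Bool.false_eq_true, if_false]
            push_cast
            ring
      · have hkey : pvKey c = none := by
          unfold pvKey
          rw [if_neg h1, if_neg h2]
        rw [if_neg h1, if_neg h2]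
        simp [hkey]

-- ===== VERDICT (by name: the statement is the Claim_ definition above) =====
theorem deconstructWord_spec : Claim_equal_deconstructWord := by
  intro word _
  unfold Spec_deconstructWord deconstructWord deconstructWord_alt
  by_cases h : word.toList.length ≥ 1
  · rw [if_pos h, if_pos h, pvALoop_char _ _ (by simp)]
    split_ifs with h2
    · rfl
    · refine congrArg some (List.map_congr_left ?_)
      intro i hi
      have hi' : i < 27 := List.mem_range.mp hi
      have hr : i < (List.replicate 27 (0 : Int)).length := by
        rw [List.length_replicate]
        exact hi'
      rw [List.getD_eq_getElem _ 0 hr, List.getElem_replicate]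
      ring
  · rw [if_neg h, if_neg h]
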